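-- pv_equiv track=rewrite | github.com/trpl333/ai-memory | app/personality.py | _fallback_personality_analysis
-- ===== SOURCE A (Python) =====
-- from typing import Dict, List, Any, Optional, Tuple
--
-- def _fallback_personality_analysis(user_messages: List[str]) -> Dict[str, float]:
--     """Simple rule-based personality analysis when LLM fails."""
--     combined_text = " ".join(user_messages).lower()
--
--     # Simple heuristics
--     metrics = {
--         "openness": 50,
--         "conscientiousness": 50,
--         "extraversion": 50,
--         "agreeableness": 50,
--         "neuroticism": 50,
--         "formality": 50,
--         "directness": 50,
--         "detail_orientation": 50,
--         "patience": 50,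
--         "technical_comfort": 50,
--         "frustration_level": 0,
--         "satisfaction_level": 50,
--         "urgency_level": 30
--     }
--
--     # Detect formality
--     formal_words = ["please", "thank you", "kindly", "appreciate", "sincerely"]
--     casual_words = ["yeah", "yep", "gonna", "wanna", "hey"]
--     formal_count = sum(1 for word in formal_words if word in combined_text)
--     casual_count = sum(1 for word in casual_words if word in combined_text)
--     metrics["formality"] = 60 if formal_count > casual_count else 40
--
--     # Detect frustration
--     frustrated_words = ["frustrated", "angry", "upset", "annoyed", "terrible", "awful", "broken"]
--     frustration_count = sum(1 for word in frustrated_words if word in combined_text)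
--     metrics["frustration_level"] = min(100, frustration_count * 25)
--
--     # Detect satisfaction
--     satisfied_words = ["great", "perfect", "excellent", "thank", "appreciate", "wonderful"]
--     satisfaction_count = sum(1 for word in satisfied_words if word in combined_text)
--     metrics["satisfaction_level"] = min(100, 50 + satisfaction_count * 15)
--
--     # Detect urgency
--     urgent_words = ["urgent", "asap", "immediately", "now", "quickly", "hurry"]
--     urgency_count = sum(1 for word in urgent_words if word in combined_text)
--     metrics["urgency_level"] = min(100, 30 + urgency_count * 20)
--
--     # Detect directness
--     metrics["directness"] = 70 if len(combined_text) < 200 else 50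
--
--     # Detect technical comfort
--     technical_words = ["api", "database", "server", "code", "technical", "system", "configure"]
--     technical_count = sum(1 for word in technical_words if word in combined_text)
--     metrics["technical_comfort"] = min(100, 40 + technical_count * 15)
--
--     return metrics
-- ===== SOURCE B (Python) =====
-- _FORMAL = ["please", "thank you", "kindly", "appreciate", "sincerely"]
-- _CASUAL = ["yeah", "yep", "gonna", "wanna", "hey"]
-- _FRUSTRATED = ["frustrated", "angry", "upset", "annoyed", "terrible", "awful", "broken"]
-- _SATISFIED = ["great", "perfect", "excellent", "thank", "appreciate", "wonderful"]
-- _URGENT = ["urgent", "asap", "immediately", "now", "quickly", "hurry"]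
-- _TECHNICAL = ["api", "database", "server", "code", "technical", "system", "configure"]
-- _ALL_WORDS = _FORMAL + _CASUAL + _FRUSTRATED + _SATISFIED + _URGENT + _TECHNICAL
--
-- _DEFAULTS = {
--     "openness": 50, "conscientiousness": 50, "extraversion": 50,
--     "agreeableness": 50, "neuroticism": 50, "formality": 50,
--     "directness": 50, "detail_orientation": 50, "patience": 50,
--     "technical_comfort": 50, "frustration_level": 0,
--     "satisfaction_level": 50, "urgency_level": 30,
-- }
--
-- _TABLE = [
--     ("frustration_level", _FRUSTRATED, 0, 25),
--     ("satisfaction_level", _SATISFIED, 50, 15),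
--     ("urgency_level", _URGENT, 30, 20),
--     ("technical_comfort", _TECHNICAL, 40, 15),
-- ]
--
-- def _fallback_personality_analysis(user_messages):
--     """Simple rule-based personality analysis when LLM fails."""
--     text = " ".join(user_messages).lower()
--
--     # Text-driven multi-pattern scan: walk the text once, collecting every
--     # keyword that occurs anywhere, instead of one substring search per keyword.
--     found = set()
--     for i in range(len(text)):
--         for w in _ALL_WORDS:
--             if w not in found and text.startswith(w, i):
--                 found.add(w)
--
--     def hits(words):
--         return sum(w in found for w in words)
--
--     metrics = dict(_DEFAULTS)
--     for name, words, base, mult in _TABLE: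
--         metrics[name] = min(100, base + mult * hits(words))
--     metrics["formality"] = 60 if hits(_FORMAL) > hits(_CASUAL) else 40
--     metrics["directness"] = 70 if len(text) < 200 else 50
--     return metrics
-- ===== Notes on version B (the rewrite author's own statement) =====
-- stated objective: alternative
-- what changed: B replaces A's per-keyword substring searches by a single text-driven scan that walks every position of the combined text once, collecting all occurring keywords into a found-set, and then assembles the metrics dict from a configuration table of (name, words, base, multiplier) entries instead of A's five separate hand-written passes.
import Mathlib
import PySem

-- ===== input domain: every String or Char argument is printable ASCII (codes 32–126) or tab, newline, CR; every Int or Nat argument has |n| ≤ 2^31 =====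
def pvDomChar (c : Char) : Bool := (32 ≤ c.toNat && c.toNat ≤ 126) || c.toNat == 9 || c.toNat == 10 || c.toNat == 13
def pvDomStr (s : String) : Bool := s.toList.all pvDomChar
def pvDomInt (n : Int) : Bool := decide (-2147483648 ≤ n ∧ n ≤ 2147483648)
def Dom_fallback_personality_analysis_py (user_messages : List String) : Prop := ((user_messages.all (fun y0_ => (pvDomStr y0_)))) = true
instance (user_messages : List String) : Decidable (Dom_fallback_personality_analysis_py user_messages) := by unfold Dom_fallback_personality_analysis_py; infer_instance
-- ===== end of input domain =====

-- B replaces A's per-keyword substring searches by one text-driven scan collecting all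
-- occurring keywords into a set, then assembles the metrics from a configuration table
-- (objective: alternative algorithm, same values; no speed claim).

-- ===== PORT A =====
-- sum(1 for word in words if word in combined_text)
def pvA_count (words : List String) (combined_text : String) : Int :=
  words.foldl (fun n w => if PySem.Str.isIn w combined_text then n + 1 else n) 0

def fallback_personality_analysis_py (user_messages : List String) : List (String × Int) :=
  let combined_text := PySem.Str.lower (PySem.Str.join " " user_messages)
  let metrics : PySem.Dict String Int := PySem.Dict.ofList
    [("openness", 50), ("conscientiousness", 50), ("extraversion", 50),
     ("agreeableness", 50), ("neuroticism", 50), ("formality", 50),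
     ("directness", 50), ("detail_orientation", 50), ("patience", 50),
     ("technical_comfort", 50), ("frustration_level", 0),
     ("satisfaction_level", 50), ("urgency_level", 30)]
  let formal_count := pvA_count ["please", "thank you", "kindly", "appreciate", "sincerely"] combined_text
  let casual_count := pvA_count ["yeah", "yep", "gonna", "wanna", "hey"] combined_text
  let metrics := metrics.insert "formality" (if formal_count > casual_count then 60 else 40)
  let frustration_count := pvA_count ["frustrated", "angry", "upset", "annoyed", "terrible", "awful", "broken"] combined_text
  let metrics := metrics.insert "frustration_level" (min 100 (frustration_count * 25))
  let satisfaction_count := pvA_count ["great", "perfect", "excellent", "thank", "appreciate", "wonderful"] combined_text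
  let metrics := metrics.insert "satisfaction_level" (min 100 (50 + satisfaction_count * 15))
  let urgency_count := pvA_count ["urgent", "asap", "immediately", "now", "quickly", "hurry"] combined_text
  let metrics := metrics.insert "urgency_level" (min 100 (30 + urgency_count * 20))
  let metrics := metrics.insert "directness" (if (PySem.Str.len combined_text : Int) < 200 then 70 else 50)
  let technical_count := pvA_count ["api", "database", "server", "code", "technical", "system", "configure"] combined_text
  let metrics := metrics.insert "technical_comfort" (min 100 (40 + technical_count * 15))
  metrics.items

-- ===== PORT B =====
def pvFormal : List String := ["please", "thank you", "kindly", "appreciate", "sincerely"]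
def pvCasual : List String := ["yeah", "yep", "gonna", "wanna", "hey"]
def pvFrustrated : List String := ["frustrated", "angry", "upset", "annoyed", "terrible", "awful", "broken"]
def pvSatisfied : List String := ["great", "perfect", "excellent", "thank", "appreciate", "wonderful"]
def pvUrgent : List String := ["urgent", "asap", "immediately", "now", "quickly", "hurry"]
def pvTechnical : List String := ["api", "database", "server", "code", "technical", "system", "configure"]
def pvAllWords : List String := pvFormal ++ pvCasual ++ pvFrustrated ++ pvSatisfied ++ pvUrgent ++ pvTechnical

def pvDefaults : List (String × Int) :=
  [("openness", 50), ("conscientiousness", 50), ("extraversion", 50),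
   ("agreeableness", 50), ("neuroticism", 50), ("formality", 50),
   ("directness", 50), ("detail_orientation", 50), ("patience", 50),
   ("technical_comfort", 50), ("frustration_level", 0),
   ("satisfaction_level", 50), ("urgency_level", 30)]

def pvTable : List (String × List String × Int × Int) :=
  [("frustration_level", pvFrustrated, 0, 25),
   ("satisfaction_level", pvSatisfied, 50, 15),
   ("urgency_level", pvUrgent, 30, 20),
   ("technical_comfort", pvTechnical, 40, 15)]

-- for i in range(len(text)): for w in _ALL_WORDS: if w not in found and text.startswith(w, i): found.add(w)
def pvFound (text : List Char) : PySem.Set String :=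
  (List.range text.length).foldl
    (fun fd i =>
      pvAllWords.foldl
        (fun fd w =>
          if !(PySem.Set.contains fd w) && PySem.Chars.startswith (text.drop i) w.toList
          then PySem.Set.add fd w else fd)
        fd)
    PySem.Set.empty

-- sum(w in found for w in words)
def pvHits (found : PySem.Set String) (words : List String) : Int :=
  (words.countP (fun w => PySem.Set.contains found w) : Nat)

def fallback_personality_analysis_py_alt (user_messages : List String) : List (String × Int) :=
  let text := PySem.Str.lower (PySem.Str.join " " user_messages)
  let found := pvFound text.toList
  let metrics : PySem.Dict String Int := PySem.Dict.ofList pvDefaults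
  let metrics := pvTable.foldl
    (fun m e => m.insert e.1 (min 100 (e.2.2.1 + e.2.2.2 * pvHits found e.2.1))) metrics
  let metrics := metrics.insert "formality"
    (if pvHits found pvFormal > pvHits found pvCasual then 60 else 40)
  let metrics := metrics.insert "directness" (if (PySem.Str.len text : Int) < 200 then 70 else 50)
  metrics.items

-- ===== PRECONDITION & SPEC =====
def Spec_fallback_personality_analysis_py (user_messages : List String) (out : List (String × Int)) : Prop := out = fallback_personality_analysis_py_alt user_messages
instance (user_messages : List String) (out : List (String × Int)) : Decidable (Spec_fallback_personality_analysis_py user_messages out) := by unfold Spec_fallback_personality_analysis_py; infer_instance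

-- ===== CLAIM (what is proved, stated in full; the proofs are below) =====
def Claim_equal_fallback_personality_analysis_py : Prop := ∀ (user_messages : List String), Dom_fallback_personality_analysis_py user_messages → Spec_fallback_personality_analysis_py user_messages (fallback_personality_analysis_py user_messages)

-- ===== LEMMAS AND PROOFS =====

-- A's "sum 1 if word in text" fold is a countP.
theorem pvA_count_eq_countP (ws : List String) (t : String) :
    pvA_count ws t = ((ws.countP (fun w => PySem.Str.isIn w t) : Nat) : Int) := by
  unfold pvA_count
  suffices h : ∀ (n : Int) (ws : List String),
      ws.foldl (fun n w => if PySem.Str.isIn w t then n + 1 else n) n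
        = n + (ws.countP (fun w => PySem.Str.isIn w t) : Nat) by
    simpa using h 0 ws
  intro n ws
  induction ws generalizing n with
  | nil => simp
  | cons w ws ih =>
    simp only [List.foldl_cons, List.countP_cons, ih]
    split <;> push_cast <;> ring

-- membership after the inner loop over the keyword list
theorem pv_inner_mem (text : List Char) (i : Nat) (ws : List String)
    (fd : PySem.Set String) (w : String) :
    w ∈ ws.foldl
        (fun fd w =>
          if !(PySem.Set.contains fd w) && PySem.Chars.startswith (text.drop i) w.toList
          then PySem.Set.add fd w else fd) fd
      ↔ w ∈ fd ∨ (w ∈ ws ∧ PySem.Chars.startswith (text.drop i) w.toList = true) := by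
  induction ws generalizing fd with
  | nil => simp
  | cons w' ws ih =>
    have hstep : (if !(PySem.Set.contains fd w') && PySem.Chars.startswith (text.drop i) w'.toList
          then PySem.Set.add fd w' else fd)
        = if PySem.Chars.startswith (text.drop i) w'.toList = true
          then PySem.Set.add fd w' else fd := by
      cases hc : PySem.Set.contains fd w' <;>
        cases hs : PySem.Chars.startswith (text.drop i) w'.toList <;> simp [*]
      exact (PySem.Set.add_of_mem ((PySem.Set.contains_iff fd w').mp hc)).symm
    rw [List.foldl_cons, hstep, ih]
    by_cases hs : PySem.Chars.startswith (text.drop i) w'.toList = true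
    · rw [if_pos hs]
      simp only [PySem.Set.mem_add, List.mem_cons]
      constructor
      · rintro ((h | rfl) | ⟨h1, h2⟩)
        · exact Or.inl h
        · exact Or.inr ⟨Or.inl rfl, hs⟩
        · exact Or.inr ⟨Or.inr h1, h2⟩
      · rintro (h | ⟨(rfl | h1), h2⟩)
        · exact Or.inl (Or.inl h)
        · exact Or.inl (Or.inr rfl)
        · exact Or.inr ⟨h1, h2⟩
    · rw [if_neg hs]
      simp only [List.mem_cons]
      constructor
      · rintro (h | ⟨h1, h2⟩)
        · exact Or.inl h
        · exact Or.inr ⟨Or.inr h1, h2⟩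
      · rintro (h | ⟨(rfl | h1), h2⟩)
        · exact Or.inl h
        · exact absurd h2 hs
        · exact Or.inr ⟨h1, h2⟩

-- membership in the scan's result
theorem pv_found_mem (text : List Char) (w : String) :
    w ∈ pvFound text
      ↔ w ∈ pvAllWords ∧ ∃ i < text.length,
          PySem.Chars.startswith (text.drop i) w.toList = true := by
  unfold pvFound
  suffices h : ∀ (l : List Nat) (fd : PySem.Set String),
      w ∈ l.foldl
          (fun fd i =>
            pvAllWords.foldl
              (fun fd w =>
                if !(PySem.Set.contains fd w) && PySem.Chars.startswith (text.drop i) w.toList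
                then PySem.Set.add fd w else fd) fd) fd
        ↔ w ∈ fd ∨ (w ∈ pvAllWords ∧ ∃ i ∈ l,
            PySem.Chars.startswith (text.drop i) w.toList = true) by
    rw [h]
    simp [PySem.Set.empty, List.mem_range]
  intro l
  induction l with
  | nil => simp
  | cons a l ih =>
    intro fd
    simp only [List.foldl_cons, ih, pv_inner_mem, List.exists_mem_cons_iff]
    tauto

-- a keyword from the table is in the found set iff it occurs in the text
theorem pv_found_isIn (text : List Char) (w : String)
    (hall : w ∈ pvAllWords) (hne : w.toList ≠ []) :
    PySem.Set.contains (pvFound text) w = PySem.Chars.isIn w.toList text := by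
  have h2 := PySem.Chars.exists_prefix_drop_iff_isIn (sub := w.toList) (s := text)
  have h3 : (∃ i < text.length, PySem.Chars.startswith (text.drop i) w.toList = true)
      ↔ (∃ j, w.toList <+: text.drop j) := by
    constructor
    · rintro ⟨i, _, hs⟩
      exact ⟨i, (PySem.Chars.startswith_iff _ _).mp hs⟩
    · rintro ⟨j, hp⟩
      have hj : j < text.length := by
        by_contra hle
        rw [not_lt] at hle
        rw [List.drop_eq_nil_of_le hle] at hp
        exact hne (List.prefix_nil.mp hp)
      exact ⟨j, hj, (PySem.Chars.startswith_iff _ _).mpr hp⟩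
  have h4 : PySem.Set.contains (pvFound text) w = true
      ↔ PySem.Chars.isIn w.toList text = true := by
    rw [PySem.Set.contains_iff, pv_found_mem]
    constructor
    · rintro ⟨_, hex⟩
      exact h2.mp (h3.mp hex)
    · intro hi
      exact ⟨hall, h3.mpr (h2.mpr hi)⟩
  cases hA : PySem.Set.contains (pvFound text) w <;>
    cases hB : PySem.Chars.isIn w.toList text <;> simp_all

-- B's hit count over the found set equals A's per-keyword count
theorem pv_hits_eq (text : String) (ws : List String)
    (h : ∀ w ∈ ws, w ∈ pvAllWords ∧ w.toList ≠ []) :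
    pvHits (pvFound text.toList) ws = pvA_count ws text := by
  unfold pvHits
  rw [pvA_count_eq_countP]
  norm_cast
  apply List.countP_congr
  intro w hw
  rw [pv_found_isIn text.toList w (h w hw).1 (h w hw).2]
  simp

-- ===== VERDICT (by name: the statement is the Claim_ definition above) =====
theorem fallback_personality_analysis_py_spec : Claim_equal_fallback_personality_analysis_py := by
  intro user_messages _
  show _ = _
  unfold fallback_personality_analysis_py fallback_personality_analysis_py_alt
  simp only [pvTable, pvDefaults, List.foldl_cons, List.foldl_nil]
  rw [pv_hits_eq _ pvFormal (by decide), pv_hits_eq _ pvCasual (by decide),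
      pv_hits_eq _ pvFrustrated (by decide), pv_hits_eq _ pvSatisfied (by decide),
      pv_hits_eq _ pvUrgent (by decide), pv_hits_eq _ pvTechnical (by decide)]
  simp only [pvFormal, pvCasual, pvFrustrated, pvSatisfied, pvUrgent, pvTechnical]
  generalize PySem.Str.lower (PySem.Str.join " " user_messages) = t
  simp [PySem.Dict.insert, PySem.Dict.ofList, PySem.Dict.update, PySem.Dict.empty,
        PySem.Dict.contains, mul_comm]
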